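-- pv_equiv track=rewrite | github.com/shirlyjiji/Multi-Language-Translator | ai_translation.py | split_into_chapters
-- ===== SOURCE A (Python) =====
-- from typing import Optional, TypedDict, List
--
-- def split_into_chapters(text: str) -> List[str]:
--     chapters = []
--     buffer = []
--     for line in text.splitlines():
--         if line.strip().lower().startswith(("chapter ", "chap ", "ch ")):
--             if buffer:
--                 chapters.append("\n".join(buffer))
--                 buffer = []
--         buffer.append(line)
--     if buffer:
--         chapters.append("\n".join(buffer))
--     return chapters
-- ===== SOURCE B (Python) =====
-- def _is_heading(line: str) -> bool:
--     return line.strip().lower().startswith(("chapter ", "chap ", "ch "))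
--
-- def split_into_chapters(text: str):
--     lines = text.splitlines()
--     chapters = []
--     i = 0
--     n = len(lines)
--     while i < n:
--         j = i + 1
--         while j < n and not _is_heading(lines[j]):
--             j += 1
--         chapters.append("\n".join(lines[i:j]))
--         i = j
--     return chapters
-- ===== Notes on version B (the rewrite author's own statement) =====
-- stated objective: alternative
-- what changed: Replaces A's single-pass accumulator-and-flush loop (mutable buffer appended to on every line, flushed on each heading) with a two-pointer segment scan: for each chapter start, an inner scan finds the next heading line and the chapter is emitted as one slice join, with no buffer state carried across lines.
import Mathlib
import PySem

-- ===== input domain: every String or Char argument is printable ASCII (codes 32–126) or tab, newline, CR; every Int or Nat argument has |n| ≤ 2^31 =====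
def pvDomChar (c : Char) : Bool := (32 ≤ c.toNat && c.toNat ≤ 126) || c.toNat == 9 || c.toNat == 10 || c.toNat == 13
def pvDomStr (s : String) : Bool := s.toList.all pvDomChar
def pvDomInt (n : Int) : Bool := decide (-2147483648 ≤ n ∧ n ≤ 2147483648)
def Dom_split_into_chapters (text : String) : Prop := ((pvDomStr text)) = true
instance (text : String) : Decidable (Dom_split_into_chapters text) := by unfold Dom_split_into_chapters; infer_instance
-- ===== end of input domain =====

-- B replaces A's accumulator-and-flush single pass by a two-pointer segment scan (find next heading, emit one slice per chapter); same result, same cost.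


-- ===== PORT A =====
-- the heading test both Pythons perform: line.strip().lower().startswith(("chapter ", "chap ", "ch "))
def isHeading (line : String) : Bool :=
  let t := PySem.Str.lower (PySem.Str.strip line)
  PySem.Str.startswith t "chapter " || PySem.Str.startswith t "chap " || PySem.Str.startswith t "ch "

-- the body of A's for-loop: flush the buffer on a heading line, then append the line
def stepA (st : List String × List String) (line : String) : List String × List String :=
  let st := if isHeading line then
              (if st.2 ≠ [] then (st.1 ++ [PySem.Str.join "\n" st.2], ([] : List String)) else st)
            else st
  (st.1, st.2 ++ [line])

def split_into_chapters (text : String) : List String :=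
  let r := (PySem.Str.splitlines text).foldl stepA ([], [])
  if r.2 ≠ [] then r.1 ++ [PySem.Str.join "\n" r.2] else r.1

-- ===== PORT B =====
-- B's outer while-loop: each step consumes one whole chapter (the current line plus the
-- inner scan up to, not including, the next heading line) and continues at that heading.
def altGo : List String → List String
  | [] => []
  | l :: rest =>
    PySem.Str.join "\n" (l :: rest.takeWhile (fun x => !isHeading x))
      :: altGo (rest.dropWhile (fun x => !isHeading x))
termination_by l => l.length
decreasing_by
  exact Nat.lt_succ_of_le (List.length_dropWhile_le _ _)

def split_into_chapters_alt (text : String) : List String :=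
  altGo (PySem.Str.splitlines text)

-- ===== PRECONDITION & SPEC =====
def Spec_split_into_chapters (text : String) (out : List String) : Prop := out = split_into_chapters_alt text
instance (text : String) (out : List String) : Decidable (Spec_split_into_chapters text out) := by unfold Spec_split_into_chapters; infer_instance

-- ===== CLAIM (what is proved, stated in full; the proofs are below) =====
def Claim_equal_split_into_chapters : Prop := ∀ (text : String), Dom_split_into_chapters text → Spec_split_into_chapters text (split_into_chapters text)

-- ===== LEMMAS AND PROOFS =====

theorem altGo_nil : altGo [] = [] := by rw [altGo.eq_def]

theorem altGo_cons (l : String) (rest : List String) :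
    altGo (l :: rest) =
      PySem.Str.join "\n" (l :: rest.takeWhile (fun x => !isHeading x))
        :: altGo (rest.dropWhile (fun x => !isHeading x)) := by
  rw [altGo.eq_def]

-- A's finishing step (the trailing 'if buffer: chapters.append(...)')
def finishA (r : List String × List String) : List String :=
  if r.2 ≠ [] then r.1 ++ [PySem.Str.join "\n" r.2] else r.1

-- loop invariant: with a nonempty buffer, the rest of A's loop produces exactly the
-- chapter closing the buffer (up to the next heading) followed by B's chapters of the rest
theorem foldA_eq (lines : List String) : ∀ (ch buf : List String), buf ≠ [] →
    finishA (lines.foldl stepA (ch, buf)) =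
      ch ++ (PySem.Str.join "\n" (buf ++ lines.takeWhile (fun x => !isHeading x))
              :: altGo (lines.dropWhile (fun x => !isHeading x))) := by
  induction lines with
  | nil =>
    intro ch buf hbuf
    simp [finishA, hbuf, altGo_nil]
  | cons l rest ih =>
    intro ch buf hbuf
    by_cases h : isHeading l
    · have hstep : stepA (ch, buf) l = (ch ++ [PySem.Str.join "\n" buf], [l]) := by
        simp [stepA, h, hbuf]
      rw [List.foldl_cons, hstep, ih _ [l] (by simp)]
      have h1 : (l :: rest).takeWhile (fun x => !isHeading x) = [] := by simp [h]
      have h2 : (l :: rest).dropWhile (fun x => !isHeading x) = l :: rest := by simp [h]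
      rw [h1, h2, altGo_cons]
      simp
    · have hstep : stepA (ch, buf) l = (ch, buf ++ [l]) := by
        simp [stepA, h]
      rw [List.foldl_cons, hstep, ih _ (buf ++ [l]) (by simp)]
      simp [h]

-- ===== VERDICT (by name: the statement is the Claim_ definition above) =====
theorem split_into_chapters_spec : Claim_equal_split_into_chapters := by
  intro text _
  show split_into_chapters text = split_into_chapters_alt text
  unfold split_into_chapters split_into_chapters_alt
  cases hl : PySem.Str.splitlines text with
  | nil => simp [altGo_nil]
  | cons l rest =>
    have hfirst : stepA ([], []) l = ([], [l]) := by
      simp [stepA]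
    have := foldA_eq rest [] [l] (by simp)
    rw [List.foldl_cons, hfirst]
    show finishA (rest.foldl stepA ([], [l])) = _
    rw [this, altGo_cons]
    simp
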